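-- pv_equiv track=rewrite | github.com/jansoft54/SSTAS | eval/metrics/mstcn_code.py | get_labels_start_end_time_
-- ===== SOURCE A (Python) =====
-- def get_labels_start_end_time_(frame_wise_labels, ignore_ids):
--     labels = []
--     starts = []
--     ends = []
--     last_label = frame_wise_labels[0]
--
--     # Init first segment
--     if frame_wise_labels[0] not in ignore_ids:
--         labels.append(frame_wise_labels[0])
--         starts.append(0)
--
--     for i in range(len(frame_wise_labels)):
--         if frame_wise_labels[i] != last_label:
--             if frame_wise_labels[i] not in ignore_ids:
--                 labels.append(frame_wise_labels[i])
--                 starts.append(i)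
--             if last_label not in ignore_ids:
--                 ends.append(i)
--             last_label = frame_wise_labels[i]
--
--     if last_label not in ignore_ids:
--         ends.append(len(frame_wise_labels))
--
--     return labels, starts, ends
-- ===== SOURCE B (Python) =====
-- def get_labels_start_end_time_(frame_wise_labels, ignore_ids):
--     # Run-length encode the frame labels, then emit one segment per run.
--     runs = []
--     for x in frame_wise_labels:
--         if runs and runs[-1][0] == x:
--             runs[-1][1] += 1
--         else:
--             runs.append([x, 1])
--     labels, starts, ends = [], [], []
--     i = 0
--     for label, n in runs:
--         if label not in ignore_ids:
--             labels.append(label)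
--             starts.append(i)
--             ends.append(i + n)
--         i += n
--     return labels, starts, ends
-- ===== Notes on version B (the rewrite author's own statement) =====
-- stated objective: alternative
-- what changed: B first run-length-encodes the frame labels into (label, length) runs, then a single fold over the runs emits (label, start, end) per non-ignored run, instead of A's inline transition detection with last_label state and a deferred final end append; B also membership-tests ignore_ids once per run rather than once per frame.
import Mathlib
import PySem

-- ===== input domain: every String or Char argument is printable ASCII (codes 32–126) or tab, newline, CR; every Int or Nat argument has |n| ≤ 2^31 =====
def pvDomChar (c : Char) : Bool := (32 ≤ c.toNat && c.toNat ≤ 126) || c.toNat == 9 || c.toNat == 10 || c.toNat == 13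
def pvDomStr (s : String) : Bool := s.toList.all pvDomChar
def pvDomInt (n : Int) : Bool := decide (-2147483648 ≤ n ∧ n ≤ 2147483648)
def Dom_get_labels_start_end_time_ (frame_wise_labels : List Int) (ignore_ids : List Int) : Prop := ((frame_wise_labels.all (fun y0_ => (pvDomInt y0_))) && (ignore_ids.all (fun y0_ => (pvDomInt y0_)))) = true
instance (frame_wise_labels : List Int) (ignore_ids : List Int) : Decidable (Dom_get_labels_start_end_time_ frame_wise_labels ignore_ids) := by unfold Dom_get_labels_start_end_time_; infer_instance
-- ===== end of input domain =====

-- B run-length-encodes the frames and folds once over the runs (A detects transitions inline); return values proved equal on nonempty input.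


-- ===== PORT A =====
-- A's loop body: appends to labels/starts on a non-ignored new label, to ends when the old segment was not ignored, then last := x
def stepA (ignore_ids : List Int) (st : List Int × List Int × List Int × Int) (p : Int × Int) : List Int × List Int × List Int × Int :=
  if p.2 ≠ st.2.2.2 then
    ((if ignore_ids.contains p.2 then st.1 else st.1 ++ [p.2]),
     (if ignore_ids.contains p.2 then st.2.1 else st.2.1 ++ [p.1]),
     (if ignore_ids.contains st.2.2.2 then st.2.2.1 else st.2.2.1 ++ [p.1]),
     p.2)
  else st

def get_labels_start_end_time_ (frame_wise_labels : List Int) (ignore_ids : List Int) : List Int × List Int × List Int :=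
  match frame_wise_labels with
  | [] => ([], [], [])  -- frame_wise_labels[0] raises IndexError in Python; excluded by Pre_
  | h :: _ =>
    -- init first segment
    let ls0 : List Int := if ignore_ids.contains h then [] else [h]
    let ss0 : List Int := if ignore_ids.contains h then [] else [0]
    -- for i in range(len(frame_wise_labels)): … frame_wise_labels[i] …
    let r := (PySem.List.pyRange 0 (PySem.List.len frame_wise_labels) 1).foldl
      (fun st j => stepA ignore_ids st (j, PySem.List.pyGetD frame_wise_labels j 0)) (ls0, ss0, [], h)
    (r.1, r.2.1, if ignore_ids.contains r.2.2.2 then r.2.2.1 else r.2.2.1 ++ [PySem.List.len frame_wise_labels])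

-- ===== PORT B =====
-- Source B's first loop mutates the LAST run of `runs` in place; ported as a head-accumulator that is reversed at the end
def stepR (acc : List (Int × Int)) (x : Int) : List (Int × Int) :=
  match acc with
  | (z, m) :: r => if z = x then (z, m + 1) :: r else (x, 1) :: (z, m) :: r
  | [] => [(x, 1)]

def stepB (ignore_ids : List Int) (st : List Int × List Int × List Int × Int) (p : Int × Int) : List Int × List Int × List Int × Int :=
  if ignore_ids.contains p.1 then (st.1, st.2.1, st.2.2.1, st.2.2.2 + p.2)
  else (st.1 ++ [p.1], st.2.1 ++ [st.2.2.2], st.2.2.1 ++ [st.2.2.2 + p.2], st.2.2.2 + p.2)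

def get_labels_start_end_time__alt (frame_wise_labels : List Int) (ignore_ids : List Int) : List Int × List Int × List Int :=
  let runs := (frame_wise_labels.foldl stepR []).reverse
  let r := runs.foldl (stepB ignore_ids) ([], [], [], 0)
  (r.1, r.2.1, r.2.2.1)

-- ===== PRECONDITION & SPEC =====
-- Pre_ excludes only the empty frame list, on which A raises IndexError (frame_wise_labels[0]).
def Pre_get_labels_start_end_time_ (frame_wise_labels : List Int) (ignore_ids : List Int) : Prop := frame_wise_labels ≠ []
instance (frame_wise_labels : List Int) (ignore_ids : List Int) : Decidable (Pre_get_labels_start_end_time_ frame_wise_labels ignore_ids) := by unfold Pre_get_labels_start_end_time_; infer_instance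
def pvWitness_get_labels_start_end_time_ : List Int × List Int := ([1, 1, 2, 3, 3], [2])

def Spec_get_labels_start_end_time_ (frame_wise_labels : List Int) (ignore_ids : List Int) (out : List Int × List Int × List Int) : Prop := out = get_labels_start_end_time__alt frame_wise_labels ignore_ids
instance (frame_wise_labels : List Int) (ignore_ids : List Int) (out : List Int × List Int × List Int) : Decidable (Spec_get_labels_start_end_time_ frame_wise_labels ignore_ids out) := by unfold Spec_get_labels_start_end_time_; infer_instance

-- ===== CLAIM =====
def Claim_equal_get_labels_start_end_time_ : Prop := ∀ (frame_wise_labels : List Int) (ignore_ids : List Int), Dom_get_labels_start_end_time_ frame_wise_labels ignore_ids → Pre_get_labels_start_end_time_ frame_wise_labels ignore_ids → Spec_get_labels_start_end_time_ frame_wise_labels ignore_ids (get_labels_start_end_time_ frame_wise_labels ignore_ids)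
-- ===== LEMMAS AND PROOFS =====

-- leading-run length / remainder of xs with respect to a label y
def leadLen (y : Int) : List Int → Int
  | [] => 0
  | x :: xs => if x = y then 1 + leadLen y xs else 0

def dropLead (y : Int) : List Int → List Int
  | [] => []
  | x :: xs => if x = y then dropLead y xs else x :: xs

-- merge a run (y, m) onto the front of a run list
def consRun (y m : Int) (rs : List (Int × Int)) : List (Int × Int) :=
  match rs with
  | [] => [(y, m)]
  | (z, k) :: r => if y = z then (y, m + k) :: r else (y, m) :: (z, k) :: r

-- run-length encoding, built structurally from the back
def runsR : List Int → List (Int × Int)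
  | [] => []
  | x :: xs => consRun x 1 (runsR xs)

-- A's loop as a structural recursion carrying (index, last_label, three output lists), including the final end-append
def loopA (ign : List Int) : List Int → Int → Int → List Int × List Int × List Int → List Int × List Int × List Int
  | [], i, last, (ls, ss, es) => (ls, ss, if ign.contains last then es else es ++ [i])
  | x :: xs, i, last, (ls, ss, es) =>
    if x ≠ last then
      loopA ign xs (i + 1) x
        ((if ign.contains x then ls else ls ++ [x]),
         (if ign.contains x then ss else ss ++ [i]),
         (if ign.contains last then es else es ++ [i]))
    else loopA ign xs (i + 1) last (ls, ss, es)

theorem consRun_head (y m : Int) (rs : List (Int × Int)) : ∃ k r', consRun y m rs = (y, k) :: r' := by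
  cases rs with
  | nil => exact ⟨m, [], rfl⟩
  | cons p r =>
    obtain ⟨z, k⟩ := p
    by_cases h : y = z
    · exact ⟨m + k, r, by simp [consRun, h]⟩
    · exact ⟨m, (z, k) :: r, by simp [consRun, h]⟩

theorem consRun_consRun_same (y n : Int) (rs : List (Int × Int)) :
    consRun y n (consRun y 1 rs) = consRun y (n + 1) rs := by
  cases rs with
  | nil => simp [consRun]
  | cons p r =>
    obtain ⟨z, k⟩ := p
    by_cases h : y = z
    · simp [consRun, h]; ring
    · simp [consRun, h]

theorem foldl_stepR_acc (xs : List Int) : ∀ (y n : Int) (t : List (Int × Int)),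
    (List.foldl stepR ((y, n) :: t) xs).reverse = t.reverse ++ consRun y n (runsR xs) := by
  induction xs with
  | nil => intro y n t; simp [runsR, consRun]
  | cons x xs ih =>
    intro y n t
    by_cases h : y = x
    · rw [List.foldl_cons, show stepR ((y, n) :: t) x = (y, n + 1) :: t from by simp [stepR, h], ih,
          show runsR (x :: xs) = consRun x 1 (runsR xs) from rfl, ← h, consRun_consRun_same]
    · rw [List.foldl_cons, show stepR ((y, n) :: t) x = (x, 1) :: (y, n) :: t from by simp [stepR, h],
          ih x 1 ((y, n) :: t)]
      obtain ⟨k, r', hr⟩ := consRun_head x 1 (runsR xs)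
      rw [show runsR (x :: xs) = consRun x 1 (runsR xs) from rfl, hr]
      simp [consRun, h]

theorem foldl_stepR_nil (xs : List Int) : (List.foldl stepR [] xs).reverse = runsR xs := by
  cases xs with
  | nil => rfl
  | cons x xs => simpa [runsR] using foldl_stepR_acc xs x 1 []

theorem runsR_cons (y : Int) (t : List Int) :
    runsR (y :: t) = (y, 1 + leadLen y t) :: runsR (dropLead y t) := by
  induction t generalizing y with
  | nil => simp [runsR, consRun, leadLen, dropLead]
  | cons x t ih =>
    by_cases h : x = y
    · rw [show runsR (y :: x :: t) = consRun y 1 (runsR (x :: t)) from rfl, ih x, h]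
      simp [consRun, leadLen, dropLead]
    · have h' : ¬ y = x := fun e => h e.symm
      rw [show runsR (y :: x :: t) = consRun y 1 (runsR (x :: t)) from rfl, ih x]
      simp only [leadLen, if_neg h, dropLead, if_neg h, consRun, if_neg h', ← ih x]
      norm_num

theorem enumerate_foldl_eq_loopA (ign : List Int) (xs : List Int) :
    ∀ (i last : Int) (ls ss es : List Int),
    (let r := (PySem.List.enumerate xs i).foldl (stepA ign) (ls, ss, es, last);
     (r.1, r.2.1, if ign.contains r.2.2.2 then r.2.2.1 else r.2.2.1 ++ [i + (xs.length : Int)]))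
      = loopA ign xs i last (ls, ss, es) := by
  induction xs with
  | nil => intro i last ls ss es; simp [PySem.List.enumerate_nil, loopA]
  | cons x xs ih =>
    intro i last ls ss es
    rw [PySem.List.enumerate_cons]
    have harith : i + (((x :: xs).length : Int)) = i + 1 + (xs.length : Int) := by
      simp; ring
    by_cases h : x = last
    · rw [List.foldl_cons,
          show stepA ign (ls, ss, es, last) (i, x) = (ls, ss, es, last) from by simp [stepA, h],
          show loopA ign (x :: xs) i last (ls, ss, es) = loopA ign xs (i + 1) last (ls, ss, es) from by
            simp [loopA, h],
          ← ih (i + 1) last ls ss es]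
      simp only [harith]
    · rw [List.foldl_cons,
          show stepA ign (ls, ss, es, last) (i, x)
              = ((if ign.contains x then ls else ls ++ [x]),
                 (if ign.contains x then ss else ss ++ [i]),
                 (if ign.contains last then es else es ++ [i]), x) from by simp [stepA, h],
          show loopA ign (x :: xs) i last (ls, ss, es)
              = loopA ign xs (i + 1) x
                  ((if ign.contains x then ls else ls ++ [x]),
                   (if ign.contains x then ss else ss ++ [i]),
                   (if ign.contains last then es else es ++ [i])) from by simp [loopA, h],
          ← ih (i + 1) x]
      simp only [harith]

theorem loopA_eq_runs_fold (ign : List Int) (xs : List Int) :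
    ∀ (i last : Int) (ls ss es : List Int),
    loopA ign xs i last (ls, ss, es)
      = (let r := (runsR (dropLead last xs)).foldl (stepB ign)
            (ls, ss, (if ign.contains last then es else es ++ [i + leadLen last xs]), i + leadLen last xs);
         (r.1, r.2.1, r.2.2.1)) := by
  induction xs with
  | nil => intro i last ls ss es; simp [loopA, dropLead, leadLen, runsR]
  | cons x xs ih =>
    intro i last ls ss es
    by_cases h : x = last
    · rw [show loopA ign (x :: xs) i last (ls, ss, es) = loopA ign xs (i + 1) last (ls, ss, es) from by
            simp [loopA, h],
          ih (i + 1) last ls ss es,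
          show dropLead last (x :: xs) = dropLead last xs from by simp [dropLead, h],
          show leadLen last (x :: xs) = 1 + leadLen last xs from by simp [leadLen, h]]
      have e : i + 1 + leadLen last xs = i + (1 + leadLen last xs) := by ring
      simp only [e]
    · rw [show loopA ign (x :: xs) i last (ls, ss, es)
              = loopA ign xs (i + 1) x
                  ((if ign.contains x then ls else ls ++ [x]),
                   (if ign.contains x then ss else ss ++ [i]),
                   (if ign.contains last then es else es ++ [i])) from by simp [loopA, h],
          ih (i + 1) x,
          show dropLead last (x :: xs) = x :: xs from by simp [dropLead, h],
          show leadLen last (x :: xs) = 0 from by simp [leadLen, h],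
          runsR_cons x xs, List.foldl_cons]
      have e : i + 1 + leadLen x xs = i + 0 + (1 + leadLen x xs) := by ring
      by_cases hx : x ∈ ign
      · rw [show stepB ign (ls, ss, (if ign.contains last then es else es ++ [i + 0]), i + 0)
                (x, 1 + leadLen x xs)
              = (ls, ss, (if ign.contains last then es else es ++ [i + 0]), i + 0 + (1 + leadLen x xs))
            from by simp [stepB, hx]]
        simp only [← e]
        simp [hx]
      · rw [show stepB ign (ls, ss, (if ign.contains last then es else es ++ [i + 0]), i + 0)
                (x, 1 + leadLen x xs)
              = (ls ++ [x], ss ++ [i + 0],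
                 (if ign.contains last then es else es ++ [i + 0]) ++ [i + 0 + (1 + leadLen x xs)],
                 i + 0 + (1 + leadLen x xs)) from by simp [stepB, hx]]
        simp only [← e]
        simp [hx]

theorem get_labels_start_end_time__spec : Claim_equal_get_labels_start_end_time_ := by
  unfold Claim_equal_get_labels_start_end_time_
  intro xs ign _ hpre
  unfold Spec_get_labels_start_end_time_
  match xs with
  | [] => exact absurd rfl hpre
  | h :: t =>
    unfold get_labels_start_end_time_ get_labels_start_end_time__alt
    simp only
    rw [foldl_stepR_nil, runsR_cons h t]
    have e1 : ∀ init : List Int × List Int × List Int × Int,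
        (PySem.List.pyRange 0 (PySem.List.len (h :: t)) 1).foldl
          (fun st j => stepA ign st (j, PySem.List.pyGetD (h :: t) j 0)) init
          = (PySem.List.enumerate (h :: t) 0).foldl (stepA ign) init := by
      intro init
      rw [PySem.List.enumerate_eq_map_pyRange (h :: t) (0 : Int), List.foldl_map]
    by_cases hh : h ∈ ign
    · rw [show (if ign.contains h then ([] : List Int) else [h]) = [] from by simp [hh],
          show (if ign.contains h then ([] : List Int) else [0]) = [] from by simp [hh],
          e1]
      have hA := enumerate_foldl_eq_loopA ign (h :: t) 0 h [] [] []
      simp only at hA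
      rw [show PySem.List.len (h :: t) = (0 : Int) + (((h :: t).length : Nat) : Int) from by simp]
      rw [hA, loopA_eq_runs_fold ign (h :: t) 0 h [] [] []]
      simp only [show dropLead h (h :: t) = dropLead h t from by simp [dropLead],
                 show leadLen h (h :: t) = 1 + leadLen h t from by simp [leadLen],
                 List.foldl_cons]
      rw [show stepB ign (([] : List Int), ([] : List Int), ([] : List Int), (0 : Int))
            (h, 1 + leadLen h t) = ([], [], [], 0 + (1 + leadLen h t)) from by simp [stepB, hh]]
      simp [hh]
    · rw [show (if ign.contains h then ([] : List Int) else [h]) = [h] from by simp [hh],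
          show (if ign.contains h then ([] : List Int) else [0]) = [0] from by simp [hh],
          e1]
      have hA := enumerate_foldl_eq_loopA ign (h :: t) 0 h [h] [0] []
      simp only at hA
      rw [show PySem.List.len (h :: t) = (0 : Int) + (((h :: t).length : Nat) : Int) from by simp]
      rw [hA, loopA_eq_runs_fold ign (h :: t) 0 h [h] [0] []]
      simp only [show dropLead h (h :: t) = dropLead h t from by simp [dropLead],
                 show leadLen h (h :: t) = 1 + leadLen h t from by simp [leadLen],
                 List.foldl_cons]
      rw [show stepB ign (([] : List Int), ([] : List Int), ([] : List Int), (0 : Int))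
            (h, 1 + leadLen h t)
          = ([h], [0], [0 + (1 + leadLen h t)], 0 + (1 + leadLen h t)) from by simp [stepB, hh]]
      simp [hh]
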